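-- pv_equiv track=rewrite | github.com/JG3233/advent_of_code | 2023/day4/day4.py | check_cards_for_win
-- ===== SOURCE A (Python) =====
-- def check_cards_for_win(card_details):
--     total_score = 0
--     for card in card_details:
--         score = 0
--         for number in card[2]:
--             if number in card[1]:
--                 if score == 0:
--                     score = 1
--                 else:
--                     score *= 2
--         total_score += score
--     return total_score
-- ===== SOURCE B (Python) =====
-- def check_cards_for_win(card_details):
--     total_score = 0
--     for card in card_details:
--         ws = sorted(set(card[1]))
--         ns = sorted(card[2])
--         i = j = count = 0
--         while i < len(ws) and j < len(ns):
--             if ws[i] < ns[j]: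
--                 i += 1
--             elif ns[j] < ws[i]:
--                 j += 1
--             else:
--                 count += 1
--                 j += 1
--         total_score += 1 << (count - 1) if count else 0
--     return total_score
-- ===== Notes on version B (the rewrite author's own statement) =====
-- stated objective: faster
-- what changed: Replaces A's nested membership scan with stateful doubling by a sort-based merge: per card it sorts the deduplicated winners and the numbers, counts matches with a two-pointer merge scan, and scores via the closed form 1 << (count-1) (0 when count is 0).
import Mathlib
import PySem

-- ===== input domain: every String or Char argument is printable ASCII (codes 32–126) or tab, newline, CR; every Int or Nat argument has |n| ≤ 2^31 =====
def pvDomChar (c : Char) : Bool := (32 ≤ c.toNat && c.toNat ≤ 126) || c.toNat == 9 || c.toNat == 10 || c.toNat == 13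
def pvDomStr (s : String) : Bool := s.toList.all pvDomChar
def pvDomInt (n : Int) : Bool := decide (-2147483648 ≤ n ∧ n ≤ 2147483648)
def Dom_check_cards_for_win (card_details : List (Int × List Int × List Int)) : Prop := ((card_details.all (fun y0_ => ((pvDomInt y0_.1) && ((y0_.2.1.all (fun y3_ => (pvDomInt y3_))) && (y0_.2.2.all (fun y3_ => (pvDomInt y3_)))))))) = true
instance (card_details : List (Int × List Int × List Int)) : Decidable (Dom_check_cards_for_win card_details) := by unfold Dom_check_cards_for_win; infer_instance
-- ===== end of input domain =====

-- B replaces A's nested membership scans with stateful doubling by a sort-based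
-- merge: per card it sorts the deduplicated winners and the numbers, counts the
-- matches with a two-pointer merge scan, and scores by 2^(count-1) (0 if none);
-- objective: faster (sorting replaces the quadratic per-card membership scan).

-- ===== PORT A =====
def check_cards_for_win (card_details : List (Int × List Int × List Int)) : Int :=
  card_details.foldl (fun total_score card =>
    total_score +
      card.2.2.foldl (fun score number =>
        if number ∈ card.2.1 then
          (if score = 0 then 1 else score * 2)
        else score) 0) 0

-- ===== PORT B =====
-- the two-pointer while loop of Source B, as structural recursion on the list tails
def pvMergeCount : List Int → List Int → Nat
  | [], _ => 0
  | _ :: _, [] => 0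
  | w :: ws, n :: ns =>
    if w < n then pvMergeCount ws (n :: ns)
    else if n < w then pvMergeCount (w :: ws) ns
    else 1 + pvMergeCount (w :: ws) ns
termination_by ws ns => ws.length + ns.length
decreasing_by all_goals simp

def check_cards_for_win_alt (card_details : List (Int × List Int × List Int)) : Int :=
  card_details.foldl (fun total_score card =>
    let ws := PySem.List.sorted (PySem.Set.ofList card.2.1) (fun x => x) false
    let ns := PySem.List.sorted card.2.2 (fun x => x) false
    let count := pvMergeCount ws ns
    total_score + (if count = 0 then 0 else (2 : Int) ^ (count - 1))) 0

-- ===== PRECONDITION & SPEC =====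
def Spec_check_cards_for_win (card_details : List (Int × List Int × List Int)) (out : Int) : Prop := out = check_cards_for_win_alt card_details
instance (card_details : List (Int × List Int × List Int)) (out : Int) : Decidable (Spec_check_cards_for_win card_details out) := by unfold Spec_check_cards_for_win; infer_instance

-- ===== CLAIM (what is proved, stated in full; the proofs are below) =====
def Claim_equal_check_cards_for_win : Prop := ∀ (card_details : List (Int × List Int × List Int)), Dom_check_cards_for_win card_details → Spec_check_cards_for_win card_details (check_cards_for_win card_details)

-- ===== LEMMAS AND PROOFS =====

-- On a strictly increasing ws and a non-decreasing ns, the merge scan counts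
-- the elements of ns that occur in ws.
theorem pvMergeCount_eq (ws ns : List Int)
    (hw : ws.Pairwise (· < ·)) (hn : ns.Pairwise (· ≤ ·)) :
    pvMergeCount ws ns = (ns.filter (fun x => decide (x ∈ ws))).length := by
  induction ws, ns using pvMergeCount.induct with
  | case1 ns => simp [pvMergeCount]
  | case2 w ws => simp [pvMergeCount]
  | case3 w ws n ns hlt ih =>
      have hnle : ∀ x ∈ ns, n ≤ x := (List.pairwise_cons.1 hn).1
      have hfc : (n :: ns).filter (fun x => decide (x ∈ w :: ws))
               = (n :: ns).filter (fun x => decide (x ∈ ws)) := by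
        apply List.filter_congr
        intro x hx
        rw [List.mem_cons] at hx
        have hnx : n ≤ x := by
          rcases hx with rfl | hx
          · exact le_refl _
          · exact hnle x hx
        have : x ≠ w := by omega
        simp [List.mem_cons, this]
      rw [pvMergeCount, if_pos hlt, hfc,
        ih (List.pairwise_cons.1 hw).2 hn]
  | case4 w ws n ns hlt hgt ih =>
      have hwlt : ∀ x ∈ ws, w < x := (List.pairwise_cons.1 hw).1
      have hnmem : ¬(n = w ∨ n ∈ ws) := by
        rintro (rfl | h)
        · omega
        · have := hwlt n h; omega
      rw [pvMergeCount, if_neg hlt, if_pos hgt,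
        ih hw (List.pairwise_cons.1 hn).2]
      simp [hnmem]
  | case5 w ws n ns hlt hgt ih =>
      have heq : n = w := by omega
      rw [pvMergeCount, if_neg hlt, if_neg hgt,
        ih hw (List.pairwise_cons.1 hn).2]
      simp [heq]
      omega

-- A's inner loop from a nonzero accumulator just doubles per match.
theorem pvInner_ne_zero (w : List Int) (l : List Int) (s : Int) (hs : s ≠ 0) :
    l.foldl (fun score number =>
        if number ∈ w then (if score = 0 then 1 else score * 2) else score) s
      = s * (2 : Int) ^ (l.filter (fun n => decide (n ∈ w))).length := by
  induction l generalizing s with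
  | nil => simp
  | cons h t ih =>
      by_cases hm : h ∈ w
      · have h2 : s * 2 ≠ 0 := mul_ne_zero hs (by norm_num)
        simp [List.foldl_cons, hm, hs, ih (s * 2) h2, pow_succ]
        ring
      · simp [List.foldl_cons, hm, ih s hs]

-- A's inner loop from 0 equals the closed form over the match count.
theorem pvInner_zero (w : List Int) (l : List Int) :
    l.foldl (fun score number =>
        if number ∈ w then (if score = 0 then 1 else score * 2) else score) 0
      = (let c := (l.filter (fun n => decide (n ∈ w))).length
         if c = 0 then 0 else (2 : Int) ^ (c - 1)) := by
  induction l with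
  | nil => simp
  | cons h t ih =>
      by_cases hm : h ∈ w
      · simp only [List.foldl_cons, hm, if_true]
        rw [pvInner_ne_zero w t 1 one_ne_zero]
        simp [hm]
      · simpa [List.foldl_cons, hm, List.filter_cons] using ih

-- per card, B's merge count is A's match count
theorem pvCount_eq (winners numbers : List Int) :
    pvMergeCount (PySem.List.sorted (PySem.Set.ofList winners) (fun x => x) false)
        (PySem.List.sorted numbers (fun x => x) false)
      = (numbers.filter (fun n => decide (n ∈ winners))).length := by
  set ws := PySem.List.sorted (PySem.Set.ofList winners) (fun x => x) false with hws
  set ns := PySem.List.sorted numbers (fun x => x) false with hns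
  have hw : ws.Pairwise (· < ·) := PySem.List.sorted_ofList_pairwise_lt winners
  have hn : ns.Pairwise (· ≤ ·) := PySem.List.sorted_pairwise numbers (fun x => x)
  rw [pvMergeCount_eq ws ns hw hn]
  have hmem : ∀ x, (x ∈ ws) = (x ∈ winners) := by
    intro x
    simp [hws, PySem.List.mem_sorted, PySem.Set.mem_ofList]
  have hfc : ns.filter (fun x => decide (x ∈ ws))
           = ns.filter (fun x => decide (x ∈ winners)) := by
    apply List.filter_congr; intro x _; simp [hmem x]
  rw [hfc]
  exact ((PySem.List.sorted_perm numbers (fun x => x) false).filter _).length_eq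

theorem pvFolds_eq (card_details : List (Int × List Int × List Int)) (a : Int) :
    card_details.foldl (fun total_score card =>
      total_score +
        card.2.2.foldl (fun score number =>
          if number ∈ card.2.1 then (if score = 0 then 1 else score * 2) else score) 0) a
    = card_details.foldl (fun total_score card =>
        let ws := PySem.List.sorted (PySem.Set.ofList card.2.1) (fun x => x) false
        let ns := PySem.List.sorted card.2.2 (fun x => x) false
        let count := pvMergeCount ws ns
        total_score + (if count = 0 then 0 else (2 : Int) ^ (count - 1))) a := by
  induction card_details generalizing a with
  | nil => rfl
  | cons c t ih =>
      simp only [List.foldl_cons, pvInner_zero c.2.1 c.2.2, pvCount_eq c.2.1 c.2.2]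
      exact ih _

-- ===== VERDICT (by name: the statement is the Claim_ definition above) =====
theorem check_cards_for_win_spec : Claim_equal_check_cards_for_win := by
  intro cd _
  unfold Spec_check_cards_for_win check_cards_for_win check_cards_for_win_alt
  exact pvFolds_eq cd 0
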